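-- pv_equiv track=rewrite | github.com/RobinNunkesser/python-console-sklearn | imodels/benchmarks/shared_plotting.py | _algorithm_display_map
-- ===== SOURCE A (Python) =====
-- ALGORITHM_SHORT_NAMES: dict[str, str] = {
--     # imodels
--     "C45TreeClassifier": "C4.5",
--     "DecisionTreeClassifier": "DT",
--     "FIGSClassifier": "FIGS",
--     "GreedyRuleListClassifier": "GRL",
--     "GreedyTreeClassifier": "CART",
--     "HSTreeClassifier": "HS",
--     "OneRClassifier": "OneR",
--     "SlipperClassifier": "Slipper",
--     "TaoTreeClassifier": "Tao",
--     # ExSTraCS variants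
--     "ExSTraCS": "ExS",
--     "ExSTraCS_FU1": "ExS-F1",
--     "ExSTraCS_FU2": "ExS-F2",
--     "ExSTraCS_QRF": "ExSTraCS",
-- }
--
-- def _algorithm_display_name(name: str) -> str:
--     return ALGORITHM_SHORT_NAMES.get(name, name)
--
-- def _algorithm_display_map(algorithm_names: list[str]) -> dict[str, str]:
--     base_names = {name: _algorithm_display_name(name) for name in algorithm_names}
--     counts: dict[str, int] = {}
--     for base in base_names.values():
--         counts[base] = counts.get(base, 0) + 1
--
--     display_map: dict[str, str] = {}
--     for name in algorithm_names:
--         base = base_names[name]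
--         # Keep short names concise, but disambiguate collisions safely.
--         if counts[base] > 1:
--             display_map[name] = f"{base} ({name})"
--         else:
--             display_map[name] = base
--     return display_map
-- ===== SOURCE B (Python) =====
-- ALGORITHM_SHORT_NAMES: dict[str, str] = {
--     "C45TreeClassifier": "C4.5",
--     "DecisionTreeClassifier": "DT",
--     "FIGSClassifier": "FIGS",
--     "GreedyRuleListClassifier": "GRL",
--     "GreedyTreeClassifier": "CART",
--     "HSTreeClassifier": "HS",
--     "OneRClassifier": "OneR",
--     "SlipperClassifier": "Slipper",
--     "TaoTreeClassifier": "Tao",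
--     "ExSTraCS": "ExS",
--     "ExSTraCS_FU1": "ExS-F1",
--     "ExSTraCS_FU2": "ExS-F2",
--     "ExSTraCS_QRF": "ExSTraCS",
-- }
--
--
-- def _algorithm_display_map(algorithm_names: list[str]) -> dict[str, str]:
--     # No counting structure at all: for each unique name, a collision exists
--     # iff some OTHER unique name maps to the same base (unique names are
--     # distinct, so this is exactly "base occurs more than once").
--     unique = list(dict.fromkeys(algorithm_names))
--
--     def disp(n: str) -> str:
--         return ALGORITHM_SHORT_NAMES.get(n, n)
--
--     return {
--         n: (f"{disp(n)} ({n})"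
--             if any(m != n and disp(m) == disp(n) for m in unique)
--             else disp(n))
--         for n in unique
--     }
-- ===== Notes on version B (the rewrite author's own statement) =====
-- stated objective: alternative
-- what changed: B removes A's name->base dict, counts dict and second pass entirely: it dedups the names once and decides each name's collision by a direct pairwise scan (does any OTHER unique name map to the same base?), trading A's counting dictionaries for a brute-force existence test.
import Mathlib
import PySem

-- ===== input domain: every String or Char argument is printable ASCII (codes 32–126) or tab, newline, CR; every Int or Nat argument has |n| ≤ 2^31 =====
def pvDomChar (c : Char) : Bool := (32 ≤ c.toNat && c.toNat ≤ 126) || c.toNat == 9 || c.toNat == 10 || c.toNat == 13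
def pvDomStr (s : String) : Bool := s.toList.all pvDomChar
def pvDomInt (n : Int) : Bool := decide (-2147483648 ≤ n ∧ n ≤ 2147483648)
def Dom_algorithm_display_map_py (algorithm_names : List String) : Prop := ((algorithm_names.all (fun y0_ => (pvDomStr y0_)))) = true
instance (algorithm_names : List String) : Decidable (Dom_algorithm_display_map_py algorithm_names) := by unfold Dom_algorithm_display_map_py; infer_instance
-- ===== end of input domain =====

-- B drops A's counting dictionaries: it dedups the names and decides each collision by a direct pairwise scan; objective: alternative (not faster).

-- ===== PORT A =====
def pvShortNames : PySem.Dict String String := PySem.Dict.ofList [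
  ("C45TreeClassifier", "C4.5"),
  ("DecisionTreeClassifier", "DT"),
  ("FIGSClassifier", "FIGS"),
  ("GreedyRuleListClassifier", "GRL"),
  ("GreedyTreeClassifier", "CART"),
  ("HSTreeClassifier", "HS"),
  ("OneRClassifier", "OneR"),
  ("SlipperClassifier", "Slipper"),
  ("TaoTreeClassifier", "Tao"),
  ("ExSTraCS", "ExS"),
  ("ExSTraCS_FU1", "ExS-F1"),
  ("ExSTraCS_FU2", "ExS-F2"),
  ("ExSTraCS_QRF", "ExSTraCS")]

-- port of _algorithm_display_name: ALGORITHM_SHORT_NAMES.get(name, name)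
def pvDisplayName (name : String) : String := pvShortNames.getD name name

def algorithm_display_map_py (algorithm_names : List String) : List (String × String) :=
  let base_names : PySem.Dict String String :=
    algorithm_names.foldl (fun d name => d.insert name (pvDisplayName name)) PySem.Dict.empty
  let counts : PySem.Dict String Int :=
    base_names.values.foldl (fun c base => c.insert base (c.getD base 0 + 1)) PySem.Dict.empty
  let display_map : PySem.Dict String String :=
    algorithm_names.foldl (fun d name =>
      -- base_names[name]: the key is always present (inserted in the first loop), so getD is exact
      let base := base_names.getD name ""
      if counts.getD base 0 > 1 then d.insert name (base ++ " (" ++ name ++ ")")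
      else d.insert name base) PySem.Dict.empty
  display_map.items

-- ===== PORT B =====
-- B's disp helper is the same table lookup, shared with A's helper above.
def algorithm_display_map_py_alt (algorithm_names : List String) : List (String × String) :=
  let unique := PySem.List.dedup algorithm_names
  unique.map (fun n =>
    (n, if unique.any (fun m => m != n && pvDisplayName m == pvDisplayName n)
        then pvDisplayName n ++ " (" ++ n ++ ")"
        else pvDisplayName n))

-- ===== PRECONDITION & SPEC =====
def Spec_algorithm_display_map_py (algorithm_names : List String) (out : List (String × String)) : Prop := out = algorithm_display_map_py_alt algorithm_names
instance (algorithm_names : List String) (out : List (String × String)) : Decidable (Spec_algorithm_display_map_py algorithm_names out) := by unfold Spec_algorithm_display_map_py; infer_instance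

-- ===== CLAIM (what is proved, stated in full; the proofs are below) =====
def Claim_equal_algorithm_display_map_py : Prop := ∀ (algorithm_names : List String), Dom_algorithm_display_map_py algorithm_names → Spec_algorithm_display_map_py algorithm_names (algorithm_display_map_py algorithm_names)

-- ===== LEMMAS AND PROOFS =====

-- a fold inserting (n, valfn n): lookup afterwards
theorem get?_foldl_insert_valfn (ns : List String) (valfn : String → String)
    (d : PySem.Dict String String) (k : String) :
    (ns.foldl (fun d n => d.insert n (valfn n)) d).get? k
      = if k ∈ ns then some (valfn k) else d.get? k := by
  induction ns generalizing d with
  | nil => simp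
  | cons n ns ih =>
      simp only [List.foldl_cons, ih, List.mem_cons]
      by_cases hk : k ∈ ns
      · simp [hk]
      · by_cases hkn : k = n
        · subst hkn; simp [hk, PySem.Dict.get?_insert_self]
        · simp [hk, hkn, PySem.Dict.get?_insert_of_ne (d := d) (v := valfn n) hkn]

theorem keys_foldl_insert_valfn (ns : List String) (valfn : String → String) :
    (ns.foldl (fun d n => d.insert n (valfn n)) PySem.Dict.empty).keys
      = PySem.List.dedup ns := by
  rw [PySem.Dict.keys_foldl_insert]
  simp [PySem.Dict.keys_empty, PySem.Set.update, PySem.Set.ofList_eq_foldl]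

theorem items_foldl_insert_valfn (ns : List String) (valfn : String → String) :
    (ns.foldl (fun d n => d.insert n (valfn n)) PySem.Dict.empty).items
      = (PySem.List.dedup ns).map (fun k => (k, valfn k)) := by
  rw [PySem.Dict.items_eq_map_keys _
        (by exact PySem.Dict.nodup_keys_foldl_insert _ _ _ PySem.Dict.nodup_keys_empty) ""]
  rw [keys_foldl_insert_valfn]
  refine List.map_congr_left (fun k hk => ?_)
  have hmem : k ∈ ns := (PySem.List.mem_dedup _ _).1 hk
  simp [PySem.Dict.getD_eq_get?_getD, get?_foldl_insert_valfn, hmem]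

-- on a Nodup list, "the base of k occurs at least twice among the bases"
-- is exactly "some OTHER element has the same base" (B's pairwise test)
theorem count_map_two_iff (l : List String) (f : String → String) (hnd : l.Nodup)
    (k : String) (hk : k ∈ l) :
    2 ≤ (l.map f).count (f k) ↔ ∃ m ∈ l, m ≠ k ∧ f m = f k := by
  induction l with
  | nil => cases hk
  | cons x xs ih =>
      have hx : x ∉ xs := (List.nodup_cons.1 hnd).1
      have hxs : xs.Nodup := (List.nodup_cons.1 hnd).2
      rcases List.mem_cons.1 hk with hkx | hkxs
      · subst hkx
        have hmem : (1 ≤ (xs.map f).count (f k)) ↔ ∃ m ∈ xs, f m = f k := by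
          rw [List.one_le_count_iff]
          simp [List.mem_map, eq_comm]
        constructor
        · intro h
          simp only [List.map_cons, List.count_cons_self] at h
          obtain ⟨m, hm, hfm⟩ := hmem.1 (by omega)
          exact ⟨m, List.mem_cons_of_mem _ hm, fun he => hx (he ▸ hm), hfm⟩
        · rintro ⟨m, hm, hne, hfm⟩
          rcases List.mem_cons.1 hm with h | h
          · exact absurd h hne
          · have := hmem.2 ⟨m, h, hfm⟩
            simp only [List.map_cons, List.count_cons_self]
            omega
      · have hkx : k ≠ x := fun he => hx (he ▸ hkxs)
        by_cases hfx : f x = f k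
        · have hmem : 1 ≤ (xs.map f).count (f k) := by
            rw [List.one_le_count_iff]
            exact List.mem_map.2 ⟨k, hkxs, rfl⟩
          simp only [List.map_cons]
          rw [List.count_cons]
          constructor
          · intro _
            exact ⟨x, List.mem_cons_self, fun he => hkx he.symm, hfx⟩
          · intro _
            rw [if_pos (by simp [hfx])]
            omega
        · simp only [List.map_cons]
          rw [List.count_cons, if_neg (by simp [hfx]), Nat.add_zero,
              ih hxs hkxs]
          constructor
          · rintro ⟨m, hm, hne, hfm⟩
            exact ⟨m, List.mem_cons_of_mem _ hm, hne, hfm⟩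
          · rintro ⟨m, hm, hne, hfm⟩
            rcases List.mem_cons.1 hm with h | h
            · exact absurd hfm (h ▸ hfx)
            · exact ⟨m, h, hne, hfm⟩

-- proof-only abbreviations for A's intermediate dicts and the value written per key
def pvBN (ns : List String) : PySem.Dict String String :=
  ns.foldl (fun d n => d.insert n (pvDisplayName n)) PySem.Dict.empty

def pvCnt (ns : List String) : PySem.Dict String Int :=
  (pvBN ns).values.foldl (fun c base => c.insert base (c.getD base 0 + 1)) PySem.Dict.empty

def pvVal (ns : List String) (name : String) : String :=
  if (pvCnt ns).getD ((pvBN ns).getD name "") 0 > 1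
  then (pvBN ns).getD name "" ++ " (" ++ name ++ ")"
  else (pvBN ns).getD name ""

theorem algorithm_display_map_py_eq (ns : List String) :
    algorithm_display_map_py ns = algorithm_display_map_py_alt ns := by
  show (ns.foldl (fun d name =>
      if (pvCnt ns).getD ((pvBN ns).getD name "") 0 > 1
      then d.insert name ((pvBN ns).getD name "" ++ " (" ++ name ++ ")")
      else d.insert name ((pvBN ns).getD name "")) PySem.Dict.empty).items
    = algorithm_display_map_py_alt ns
  rw [show (fun (d : PySem.Dict String String) name =>
      if (pvCnt ns).getD ((pvBN ns).getD name "") 0 > 1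
      then d.insert name ((pvBN ns).getD name "" ++ " (" ++ name ++ ")")
      else d.insert name ((pvBN ns).getD name ""))
      = (fun d name => d.insert name (pvVal ns name)) from by
        funext d name; simp only [pvVal]; split <;> rfl]
  rw [items_foldl_insert_valfn]
  unfold algorithm_display_map_py_alt
  simp only
  refine List.map_congr_left (fun k hk => ?_)
  have hmem : k ∈ ns := (PySem.List.mem_dedup _ _).1 hk
  have hbase : (pvBN ns).getD k "" = pvDisplayName k := by
    simp [pvBN, PySem.Dict.getD_eq_get?_getD, get?_foldl_insert_valfn, hmem]
  have hvalues : (pvBN ns).values = (PySem.List.dedup ns).map pvDisplayName := by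
    have := items_foldl_insert_valfn ns pvDisplayName
    simp [pvBN, PySem.Dict.values, this, List.map_map]
  have hcount : (pvCnt ns).getD (pvDisplayName k) 0
      = ((PySem.List.dedup ns).map pvDisplayName).count (pvDisplayName k) := by
    rw [pvCnt, hvalues, PySem.Dict.getD_foldl_insert_add_one]
    simp [PySem.Dict.getD_empty]
  have hany : ((PySem.List.dedup ns).any
      (fun m => m != k && pvDisplayName m == pvDisplayName k)) = true
      ↔ ∃ m ∈ PySem.List.dedup ns, m ≠ k ∧ pvDisplayName m = pvDisplayName k := by
    simp [List.any_eq_true]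
  simp only [pvVal, hbase, hcount, gt_iff_lt]
  refine congrArg (fun v => (k, v)) ?_
  refine if_congr ?_ rfl rfl
  rw [show ((1:Int) < (((PySem.List.dedup ns).map pvDisplayName).count (pvDisplayName k) : Int))
      ↔ 2 ≤ ((PySem.List.dedup ns).map pvDisplayName).count (pvDisplayName k) from by
        constructor <;> intro h <;> [exact_mod_cast h; exact_mod_cast h]]
  rw [count_map_two_iff _ _ (PySem.List.nodup_dedup ns) k hk, hany]

-- ===== VERDICT (by name: the statement is the Claim_ definition above) =====
theorem algorithm_display_map_py_spec : Claim_equal_algorithm_display_map_py := by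
  intro ns _
  exact algorithm_display_map_py_eq ns
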